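-- pv_equiv track=rewrite | github.com/NirbhaySharma/CloudxLab_AI_ML | class1.py | base_n_subtract
-- ===== SOURCE A (Python) =====
-- def base_n_subtract(num1, num2, base):
--     if base < 2 or base > 16:
--         raise ValueError("Base must be between 2 and 16.")
--
--     # Define the characters used in the given base
--     digits = '0123456789abcdef'[:base]
--
--     # Ensure both numbers are of the same length by padding the shorter one with leading zeros
--     max_length = max(len(num1), len(num2))
--     num1 = num1.zfill(max_length)
--     num2 = num2.zfill(max_length)
--
--     # Result of subtraction
--     result = []
--     borrow = 0  # To keep track of any borrowing during subtraction
--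
--     for i in range(max_length - 1, -1, -1):  # Start from the rightmost digit
--         # Get the numerical value of the digits in the current place
--         digit1 = digits.index(num1[i])
--         digit2 = digits.index(num2[i])
--
--         # Perform the subtraction with the borrow
--         diff = digit1 - digit2 - borrow
--
--         if diff < 0:
--             # Borrow from the next higher place value
--             diff += base
--             borrow = 1
--         else:
--             borrow = 0
--
--         # Append the result digit (in character form) to the result list
--         result.append(digits[diff])
--
--     # If there is still a borrow left, it means the result is negative.
--     if borrow:
--         return base_n_subtract(num2, num1, base)
--     return ''.join(result[::-1])
-- ===== SOURCE B (Python) =====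
-- def base_n_subtract(num1, num2, base):
--     if base < 2 or base > 16:
--         raise ValueError("Base must be between 2 and 16.")
--     digits = '0123456789abcdef'[:base]
--     max_length = max(len(num1), len(num2))
--     # Convert both numbers to integers (digits.index raises ValueError on invalid chars, like A)
--     v1 = 0
--     for c in num1:
--         v1 = v1 * base + digits.index(c)
--     v2 = 0
--     for c in num2:
--         v2 = v2 * base + digits.index(c)
--     # Magnitude of the difference, rendered back in the base
--     d = abs(v1 - v2)
--     out = ''
--     while d:
--         out = digits[d % base] + out
--         d //= base
--     return out.zfill(max_length)
-- ===== Notes on version B (the rewrite author's own statement) =====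
-- stated objective: alternative
-- what changed: B replaces A's right-to-left digit-by-digit subtraction with borrow tracking (and recursion on a final borrow) by converting both strings to integers, taking abs(v1-v2), and rendering the magnitude back in the base with a divide-and-prepend loop, zfilled to the padded width.
import Mathlib
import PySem

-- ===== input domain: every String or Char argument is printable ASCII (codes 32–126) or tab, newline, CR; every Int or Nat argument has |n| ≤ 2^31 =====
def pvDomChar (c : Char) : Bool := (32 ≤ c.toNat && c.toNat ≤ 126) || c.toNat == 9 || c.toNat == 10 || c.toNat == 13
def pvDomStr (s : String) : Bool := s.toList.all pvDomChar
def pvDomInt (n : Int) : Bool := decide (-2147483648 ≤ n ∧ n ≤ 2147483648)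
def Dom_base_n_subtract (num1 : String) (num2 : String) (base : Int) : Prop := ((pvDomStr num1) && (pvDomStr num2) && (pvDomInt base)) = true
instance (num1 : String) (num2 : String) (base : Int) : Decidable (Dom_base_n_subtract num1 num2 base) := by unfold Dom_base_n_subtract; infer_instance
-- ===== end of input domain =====

-- B replaces A's right-to-left digit subtraction with borrow (and recursion on a final borrow)
-- by integer conversion, abs of the difference, and a divide-and-prepend rendering loop; objective: alternative.


-- ===== PORT A =====
-- the digit alphabet '0123456789abcdef' (shared constant of both Pythons)
def pvHex : List Char := "0123456789abcdef".toList

-- A's for-loop: the (num1[i], num2[i]) pairs from i = max_length-1 down to 0, i.e. the reversed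
-- padded strings zipped; returns the result digits in Python's append order (least-significant
-- first) and the final borrow.  digits.index / digits[diff] raise in Python exactly where the
-- PySem primitives give none, so the loop is Option-valued (none only outside Pre_).
def pvPassA (dl : List Char) (base : Int) (borrow : Int) : List (Char × Char) → Option (List Char × Int)
  | [] => some ([], borrow)
  | (c1, c2) :: rest =>
    match PySem.List.index? dl c1, PySem.List.index? dl c2 with
    | some d1, some d2 =>
      let diff := (d1 : Int) - (d2 : Int) - borrow
      let p := if diff < 0 then (diff + base, (1 : Int)) else (diff, 0)
      match PySem.List.pyGet? dl p.1 with
      | some dc =>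
        match pvPassA dl base p.2 rest with
        | some (r, b') => some (dc :: r, b')
        | none => none
      | none => none
    | _, _ => none

-- Python's 'return base_n_subtract(num2, num1, base)' can recurse at most once on any input where A
-- returns (the swapped call cannot borrow again), so the recursion is unrolled one level; "" stands
-- on the paths where Python raises (all outside Pre_).
def base_n_subtract (num1 : String) (num2 : String) (base : Int) : String :=
  if base < 2 ∨ 16 < base then ""   -- raise ValueError
  else
    let dl := PySem.List.slice pvHex none (some base)   -- '0123456789abcdef'[:base]
    let n := max num1.toList.length num2.toList.length
    let p1 := PySem.Chars.zfill num1.toList (n : Int)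
    let p2 := PySem.Chars.zfill num2.toList (n : Int)
    match pvPassA dl base 0 (p1.reverse.zip p2.reverse) with
    | none => ""
    | some (r, b) =>
      if b ≠ 0 then
        match pvPassA dl base 0 (p2.reverse.zip p1.reverse) with
        | none => ""
        | some (r2, b2) => if b2 ≠ 0 then "" else String.ofList r2.reverse
      else String.ofList r.reverse

-- ===== PORT B =====
-- Source B's while-loop: out = digits[d % base] + out; d //= base.  Here d = abs(v1 - v2) ≥ 0 and
-- (after the range check) 2 ≤ base ≤ 16, so Nat arithmetic is exact; the '2 ≤ bn' guard only makes
-- the recursion total, and the getD default is never used inside Pre_ (d % bn < bn = dl.length).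
def pvRenderB (dl : List Char) (bn : Nat) (d : Nat) (out : List Char) : List Char :=
  if _h : 2 ≤ bn ∧ 0 < d then pvRenderB dl bn (d / bn) (dl.getD (d % bn) '0' :: out) else out
termination_by d
decreasing_by exact Nat.div_lt_self _h.2 (by omega)

def base_n_subtract_alt (num1 : String) (num2 : String) (base : Int) : String :=
  if base < 2 ∨ 16 < base then ""   -- raise ValueError
  else
    let bn := base.toNat             -- exact: 2 ≤ base ≤ 16 past the guard
    let dl := PySem.List.slice pvHex none (some base)
    let n := max num1.toList.length num2.toList.length
    -- v = v * base + digits.index(c); an invalid char raises in Python (outside Pre_)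
    let v1 := num1.toList.foldl (fun v c => v * bn + dl.idxOf c) 0
    let v2 := num2.toList.foldl (fun v c => v * bn + dl.idxOf c) 0
    let d := max v1 v2 - min v1 v2   -- abs(v1 - v2), in Nat
    String.ofList (PySem.Chars.zfill (pvRenderB dl bn d []) (n : Int))

-- ===== PRECONDITION & SPEC =====
-- Pre_ excludes exactly the inputs where A raises ValueError: a base outside 2..16, or a character
-- of num1/num2 that is not one of the first `base` hex digits.
def Pre_base_n_subtract (num1 : String) (num2 : String) (base : Int) : Prop :=
  2 ≤ base ∧ base ≤ 16 ∧
  num1.toList.all (· ∈ pvHex.take base.toNat) = true ∧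
  num2.toList.all (· ∈ pvHex.take base.toNat) = true
instance (num1 : String) (num2 : String) (base : Int) : Decidable (Pre_base_n_subtract num1 num2 base) := by unfold Pre_base_n_subtract; infer_instance

def pvWitness_base_n_subtract : String × String × Int := ("10", "3", 4)

def Spec_base_n_subtract (num1 : String) (num2 : String) (base : Int) (out : String) : Prop := out = base_n_subtract_alt num1 num2 base
instance (num1 : String) (num2 : String) (base : Int) (out : String) : Decidable (Spec_base_n_subtract num1 num2 base out) := by unfold Spec_base_n_subtract; infer_instance

-- ===== CLAIM (what is proved, stated in full; the proofs are below) =====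
def Claim_equal_base_n_subtract : Prop := ∀ (num1 : String) (num2 : String) (base : Int), Dom_base_n_subtract num1 num2 base → Pre_base_n_subtract num1 num2 base → Spec_base_n_subtract num1 num2 base (base_n_subtract num1 num2 base)

-- ===== LEMMAS AND PROOFS =====

-- value of a least-significant-digit-first char list
def pvVal (dl : List Char) (bn : Nat) : List Char → Nat
  | [] => 0
  | c :: t => dl.idxOf c + bn * pvVal dl bn t

lemma pvVal_append_singleton (dl : List Char) (bn : Nat) (xs : List Char) (c : Char) :
    pvVal dl bn (xs ++ [c]) = pvVal dl bn xs + bn ^ xs.length * dl.idxOf c := by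
  induction xs with
  | nil => simp [pvVal]
  | cons x t ih => simp [pvVal, ih]; ring

lemma pvFoldl_parse (dl : List Char) (bn : Nat) (s : List Char) :
    ∀ v : Nat, s.foldl (fun v c => v * bn + dl.idxOf c) v
      = v * bn ^ s.length + pvVal dl bn s.reverse := by
  induction s with
  | nil => simp [pvVal]
  | cons c t ih =>
    intro v
    simp only [List.foldl_cons, List.reverse_cons]
    rw [ih, pvVal_append_singleton]
    simp [pow_succ]
    ring

lemma pvVal_replicate_zero (dl : List Char) (bn : Nat) (h0 : dl.idxOf '0' = 0) (m : Nat) :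
    pvVal dl bn (List.replicate m '0') = 0 := by
  induction m with
  | zero => simp [pvVal]
  | succ k ih => simp [List.replicate_succ, pvVal, h0, ih]

lemma pvVal_append_zeros (dl : List Char) (bn : Nat) (h0 : dl.idxOf '0' = 0)
    (xs : List Char) (m : Nat) :
    pvVal dl bn (xs ++ List.replicate m '0') = pvVal dl bn xs := by
  induction xs with
  | nil => simpa using pvVal_replicate_zero dl bn h0 m
  | cons x t ih => simp [pvVal, ih]

lemma pvIndex?_of_mem (l : List Char) (c : Char) (h : c ∈ l) :
    PySem.List.index? l c = some (l.idxOf c) := by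
  induction l with
  | nil => simp at h
  | cons a t ih =>
    by_cases hac : a = c
    · subst hac
      rw [PySem.List.index?_cons_self]
      simp
    · have hm : c ∈ t := by simpa [Ne.symm hac] using h
      rw [PySem.List.index?_cons_of_ne t hac, ih hm]
      simp [hac]

-- the borrow produced by one digit position propagates exactly the comparison of the tails
lemma pvBorrowIff (bn d1 d2 bor w1 w2 : Nat) (hd1 : d1 < bn) (hd2 : d2 < bn) (hbor : bor ≤ 1)
    (b1 : Nat) (hb1 : b1 = if d1 < d2 + bor then 1 else 0) :
    (d1 + bn * w1 < d2 + bn * w2 + bor ↔ w1 < w2 + b1) := by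
  rcases Nat.lt_trichotomy w1 w2 with hw | hw | hw
  · have h1 : bn * (w1 + 1) ≤ bn * w2 := Nat.mul_le_mul_left bn hw
    rw [Nat.mul_add, Nat.mul_one] at h1
    split at hb1 <;> omega
  · subst hw; split at hb1 <;> omega
  · have h1 : bn * (w2 + 1) ≤ bn * w1 := Nat.mul_le_mul_left bn hw
    rw [Nat.mul_add, Nat.mul_one] at h1
    split at hb1 <;> omega

-- A's loop invariant: on valid equal-length digit lists the loop succeeds, the final borrow is 1
-- exactly when v1 < v2 + bor, and the produced digits represent v1 - v2 - bor (mod bn^n).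
lemma pvPassA_spec (dl : List Char) (bn : Nat) (_h2 : 2 ≤ bn)
    (hlen : dl.length = bn) (hnd : dl.Nodup) :
    ∀ (l1 l2 : List Char), l1.length = l2.length →
    (∀ c ∈ l1, c ∈ dl) → (∀ c ∈ l2, c ∈ dl) → ∀ bor : Nat, bor ≤ 1 →
    ∃ r : List Char,
      pvPassA dl (bn : Int) (bor : Int) (l1.zip l2)
        = some (r, if pvVal dl bn l1 < pvVal dl bn l2 + bor then 1 else 0) ∧
      (∀ c ∈ r, c ∈ dl) ∧ r.length = l1.length ∧
      pvVal dl bn r + (pvVal dl bn l2 + bor)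
        = pvVal dl bn l1 + (if pvVal dl bn l1 < pvVal dl bn l2 + bor then bn ^ l1.length else 0) := by
  intro l1
  induction l1 with
  | nil =>
    intro l2 hl _ _ bor hbor
    have : l2 = [] := List.eq_nil_of_length_eq_zero hl.symm
    subst this
    interval_cases bor
    · exact ⟨[], by simp [pvPassA, pvVal], by simp, rfl, by simp [pvVal]⟩
    · exact ⟨[], by simp [pvPassA, pvVal], by simp, rfl, by simp [pvVal]⟩
  | cons c1 t1 ih =>
    intro l2 hl hv1 hv2 bor hbor
    cases l2 with
    | nil => simp at hl
    | cons c2 t2 =>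
      have ht : t1.length = t2.length := by simpa using hl
      have hc1 : c1 ∈ dl := hv1 c1 (by simp)
      have hc2 : c2 ∈ dl := hv2 c2 (by simp)
      have hd1 : dl.idxOf c1 < bn := by rw [← hlen]; exact List.idxOf_lt_length_of_mem hc1
      have hd2 : dl.idxOf c2 < bn := by rw [← hlen]; exact List.idxOf_lt_length_of_mem hc2
      have hi1 : PySem.List.index? dl c1 = some (dl.idxOf c1) := pvIndex?_of_mem _ _ hc1
      have hi2 : PySem.List.index? dl c2 = some (dl.idxOf c2) := pvIndex?_of_mem _ _ hc2
      by_cases hb : dl.idxOf c1 < dl.idxOf c2 + bor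
      · -- borrowing position: b1 = 1, output digit index j = d1 + bn - d2 - bor
        obtain ⟨r', hpass', hvr', hlen', heq'⟩ :=
          ih t2 ht (fun c hc => hv1 c (by simp [hc])) (fun c hc => hv2 c (by simp [hc])) 1 (by omega)
        rw [Nat.cast_one] at hpass'
        have hle : dl.idxOf c2 + bor ≤ dl.idxOf c1 + bn := by omega
        set j : Nat := dl.idxOf c1 + bn - (dl.idxOf c2 + bor) with hj
        have hjlt : j < dl.length := by rw [hlen]; omega
        have hjcast : ((dl.idxOf c1 : Int) - dl.idxOf c2 - bor + bn) = (j : Int) := by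
          rw [hj]; push_cast [Nat.cast_sub hle]; ring
        have hgetj : PySem.List.pyGet? dl ((dl.idxOf c1 : Int) - dl.idxOf c2 - bor + (bn : Int)) = some dl[j] := by
          rw [hjcast, PySem.List.pyGet?_eq_some_getElem dl (by positivity) (by exact_mod_cast hjlt)]
          simp
        have hiff : (pvVal dl bn (c1 :: t1) < pvVal dl bn (c2 :: t2) + bor)
            ↔ (pvVal dl bn t1 < pvVal dl bn t2 + 1) := by
          simp only [pvVal]
          exact pvBorrowIff bn _ _ bor _ _ hd1 hd2 hbor 1 (if_pos hb).symm
        have hcond : ((dl.idxOf c1 : Int) - dl.idxOf c2 - (bor : Int) < 0) := by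
          omega
        have hrun : pvPassA dl (bn : Int) (bor : Int) ((c1, c2) :: t1.zip t2)
            = some (dl[j] :: r', if pvVal dl bn t1 < pvVal dl bn t2 + 1 then 1 else 0) := by
          simp only [pvPassA, hi1, hi2, if_pos hcond, hgetj, hpass']
        refine ⟨dl[j] :: r', ?_, ?_, ?_, ?_⟩
        · rw [List.zip_cons_cons, hrun]
          simp only [hiff]
        · intro c hc
          rcases List.mem_cons.mp hc with hc | hc
          · subst hc; exact List.getElem_mem hjlt
          · exact hvr' c hc
        · simp [hlen']
        · have hidxj : dl.idxOf dl[j] = j := hnd.idxOf_getElem j hjlt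
          by_cases hw : pvVal dl bn t1 < pvVal dl bn t2 + 1
          · rw [if_pos (hiff.mpr hw)]
            rw [if_pos hw] at heq'
            have hm := congrArg (fun t => bn * t) heq'
            simp only [Nat.mul_add] at hm
            simp only [pvVal, hidxj, List.length_cons]
            ring_nf at hm ⊢
            omega
          · rw [if_neg (fun hcon => hw (hiff.mp hcon))]
            rw [if_neg hw] at heq'
            have hm := congrArg (fun t => bn * t) heq'
            simp only [Nat.mul_add] at hm
            simp only [pvVal, hidxj]
            ring_nf at hm ⊢
            omega
      · -- no borrow here: b1 = 0, output digit index j = d1 - d2 - bor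
        obtain ⟨r', hpass', hvr', hlen', heq'⟩ :=
          ih t2 ht (fun c hc => hv1 c (by simp [hc])) (fun c hc => hv2 c (by simp [hc])) 0 (by omega)
        rw [Nat.cast_zero] at hpass'
        have hle : dl.idxOf c2 + bor ≤ dl.idxOf c1 := by omega
        set j : Nat := dl.idxOf c1 - (dl.idxOf c2 + bor) with hj
        have hjlt : j < dl.length := by rw [hlen]; omega
        have hjcast : ((dl.idxOf c1 : Int) - dl.idxOf c2 - bor) = (j : Int) := by
          rw [hj]; push_cast [Nat.cast_sub hle]; ring
        have hgetj : PySem.List.pyGet? dl ((dl.idxOf c1 : Int) - dl.idxOf c2 - bor) = some dl[j] := by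
          rw [hjcast, PySem.List.pyGet?_eq_some_getElem dl (by positivity) (by exact_mod_cast hjlt)]
          simp
        have hiff : (pvVal dl bn (c1 :: t1) < pvVal dl bn (c2 :: t2) + bor)
            ↔ (pvVal dl bn t1 < pvVal dl bn t2 + 0) := by
          simp only [pvVal]
          exact pvBorrowIff bn _ _ bor _ _ hd1 hd2 hbor 0 (if_neg hb).symm
        have hcond : ¬ ((dl.idxOf c1 : Int) - dl.idxOf c2 - (bor : Int) < 0) := by
          omega
        have hrun : pvPassA dl (bn : Int) (bor : Int) ((c1, c2) :: t1.zip t2)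
            = some (dl[j] :: r', if pvVal dl bn t1 < pvVal dl bn t2 + 0 then 1 else 0) := by
          simp only [pvPassA, hi1, hi2, if_neg hcond, hgetj, hpass']
        refine ⟨dl[j] :: r', ?_, ?_, ?_, ?_⟩
        · rw [List.zip_cons_cons, hrun]
          simp only [hiff]
        · intro c hc
          rcases List.mem_cons.mp hc with hc | hc
          · subst hc; exact List.getElem_mem hjlt
          · exact hvr' c hc
        · simp [hlen']
        · have hidxj : dl.idxOf dl[j] = j := hnd.idxOf_getElem j hjlt
          by_cases hw : pvVal dl bn t1 < pvVal dl bn t2 + 0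
          · rw [if_pos (hiff.mpr hw)]
            rw [if_pos hw] at heq'
            have hm := congrArg (fun t => bn * t) heq'
            simp only [Nat.mul_add] at hm
            simp only [pvVal, hidxj, List.length_cons]
            ring_nf at hm ⊢
            omega
          · rw [if_neg (fun hcon => hw (hiff.mp hcon))]
            rw [if_neg hw] at heq'
            have hm := congrArg (fun t => bn * t) heq'
            simp only [Nat.mul_add] at hm
            simp only [pvVal, hidxj]
            ring_nf at hm ⊢
            omega

-- least-significant-first minimal digit expansion, defined through B's renderer
def pvLsb (dl : List Char) (bn : Nat) (d : Nat) : List Char := (pvRenderB dl bn d []).reverse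

lemma pvRenderB_acc (dl : List Char) (bn : Nat) :
    ∀ (d : Nat) (out : List Char), pvRenderB dl bn d out = pvRenderB dl bn d [] ++ out := by
  intro d
  induction d using Nat.strong_induction_on with
  | _ d ih =>
    intro out
    by_cases h : 2 ≤ bn ∧ 0 < d
    · conv_lhs => rw [pvRenderB, dif_pos h]
      conv_rhs => rw [pvRenderB, dif_pos h]
      rw [ih (d / bn) (Nat.div_lt_self h.2 (by omega)) (dl.getD (d % bn) '0' :: out),
        ih (d / bn) (Nat.div_lt_self h.2 (by omega)) [dl.getD (d % bn) '0']]
      simp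
    · conv_lhs => rw [pvRenderB, dif_neg h]
      conv_rhs => rw [pvRenderB, dif_neg h]
      simp

lemma pvLsb_zero (dl : List Char) (bn : Nat) : pvLsb dl bn 0 = [] := by
  simp [pvLsb, pvRenderB]

lemma pvLsb_pos (dl : List Char) (bn : Nat) (h2 : 2 ≤ bn) (d : Nat) (hd : 0 < d) :
    pvLsb dl bn d = dl.getD (d % bn) '0' :: pvLsb dl bn (d / bn) := by
  unfold pvLsb
  rw [pvRenderB, dif_pos ⟨h2, hd⟩, pvRenderB_acc]
  simp

lemma pvRenderB_mem (dl : List Char) (bn : Nat) (h0 : '0' ∈ dl) :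
    ∀ (d : Nat) (out : List Char), (∀ c ∈ out, c ∈ dl) → ∀ c ∈ pvRenderB dl bn d out, c ∈ dl := by
  intro d
  induction d using Nat.strong_induction_on with
  | _ d ih =>
    intro out hout c hc
    by_cases h : 2 ≤ bn ∧ 0 < d
    · rw [pvRenderB, dif_pos h] at hc
      refine ih (d / bn) (Nat.div_lt_self h.2 (by omega)) _ ?_ c hc
      intro x hx
      rcases List.mem_cons.mp hx with hx | hx
      · subst hx
        by_cases hr : d % bn < dl.length
        · rw [List.getD_eq_getElem dl '0' hr]; exact List.getElem_mem hr
        · rw [List.getD_eq_default dl '0' (by omega)]; exact h0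
      · exact hout x hx
    · rw [pvRenderB, dif_neg h] at hc; exact hout c hc

-- any valid LSB-first digit list is its value's minimal expansion padded with zeros
lemma pvRep_unique (dl : List Char) (bn : Nat) (h2 : 2 ≤ bn)
    (hlen : dl.length = bn) (_hnd : dl.Nodup) (h00 : dl.idxOf '0' = 0) :
    ∀ r : List Char, (∀ c ∈ r, c ∈ dl) →
      r = pvLsb dl bn (pvVal dl bn r)
            ++ List.replicate (r.length - (pvLsb dl bn (pvVal dl bn r)).length) '0' := by
  intro r
  induction r with
  | nil => simp [pvVal, pvLsb_zero]
  | cons c t ih =>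
    intro hv
    have hcdl : c ∈ dl := hv c (by simp)
    have hct : ∀ x ∈ t, x ∈ dl := fun x hx => hv x (by simp [hx])
    have hidx : dl.idxOf c < bn := by rw [← hlen]; exact List.idxOf_lt_length_of_mem hcdl
    have hget : dl[dl.idxOf c]'(by rw [hlen]; exact hidx) = c := List.getElem_idxOf _
    by_cases hz : pvVal dl bn (c :: t) = 0
    · simp only [pvVal] at hz
      have hic : dl.idxOf c = 0 := by omega
      have hc0 : c = '0' := by
        have h0lt : (0 : Nat) < dl.length := by rw [hlen]; omega
        have h3 : dl[dl.idxOf '0']'(by rw [h00]; exact h0lt) = '0' := List.getElem_idxOf _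
        simp only [h00] at h3
        rw [← hget]
        simp [hic, h3]
      have hw : pvVal dl bn t = 0 := by
        rcases Nat.mul_eq_zero.mp (by omega : bn * pvVal dl bn t = 0) with h | h
        · omega
        · exact h
      have ht := ih hct
      rw [hw, pvLsb_zero] at ht
      have ht' : t = List.replicate t.length '0' := by simpa using ht
      have hz0 : pvVal dl bn (c :: t) = 0 := by simp only [pvVal]; omega
      simp only [hz0, pvLsb_zero, List.nil_append]
      rw [hc0]
      conv_lhs => rw [ht']
      simp [List.replicate_succ]
    · have hpos : 0 < pvVal dl bn (c :: t) := Nat.pos_of_ne_zero hz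
      rw [pvLsb_pos dl bn h2 _ hpos]
      have hmod : pvVal dl bn (c :: t) % bn = dl.idxOf c := by
        show (dl.idxOf c + bn * pvVal dl bn t) % bn = dl.idxOf c
        rw [Nat.add_mul_mod_self_left, Nat.mod_eq_of_lt hidx]
      have hdiv : pvVal dl bn (c :: t) / bn = pvVal dl bn t := by
        show (dl.idxOf c + bn * pvVal dl bn t) / bn = pvVal dl bn t
        rw [Nat.add_mul_div_left _ _ (by omega : 0 < bn), Nat.div_eq_of_lt hidx]
        omega
      rw [hmod, hdiv]
      have hgd : dl.getD (dl.idxOf c) '0' = c := by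
        rw [List.getD_eq_getElem dl '0' (by rw [hlen]; exact hidx)]; exact hget
      rw [hgd]
      have ht := ih hct
      calc c :: t
          = c :: (pvLsb dl bn (pvVal dl bn t)
              ++ List.replicate (t.length - (pvLsb dl bn (pvVal dl bn t)).length) '0') := by
            rw [← ht]
        _ = _ := by simp

-- facts about the digit alphabet dl = pvHex.take bn
lemma pvDl_len (bn : Nat) (h16 : bn ≤ 16) : (pvHex.take bn).length = bn := by
  have h : pvHex.length = 16 := by decide
  simp [List.length_take, h]; omega

lemma pvDl_nodup (bn : Nat) : (pvHex.take bn).Nodup :=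
  (by decide : pvHex.Nodup).sublist (List.take_sublist bn pvHex)

lemma pvHex_cons : pvHex = '0' :: "123456789abcdef".toList := by decide

lemma pvDl_idxOf_zero (bn : Nat) (h2 : 2 ≤ bn) : (pvHex.take bn).idxOf '0' = 0 := by
  obtain ⟨k, rfl⟩ : ∃ k, bn = k + 1 := ⟨bn - 1, by omega⟩
  rw [pvHex_cons, List.take_succ_cons, List.idxOf_cons_self]

lemma pvDl_zero_mem (bn : Nat) (h2 : 2 ≤ bn) : '0' ∈ pvHex.take bn := by
  obtain ⟨k, rfl⟩ : ∃ k, bn = k + 1 := ⟨bn - 1, by omega⟩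
  rw [pvHex_cons, List.take_succ_cons]
  exact List.mem_cons_self

lemma pvDl_nosign (bn : Nat) : ∀ c ∈ pvHex.take bn, c ≠ '+' ∧ c ≠ '-' := by
  have hall : pvHex.all (fun c => c != '+' && c != '-') = true := by decide
  intro c hc
  have hmem : c ∈ pvHex := List.take_subset bn pvHex hc
  have := List.all_eq_true.mp hall c hmem
  simpa using this

-- Python zfill on a sign-free string is left-padding with zeros
lemma pvZfill_shape (cs : List Char) (w : Nat) (hs : ∀ c ∈ cs, c ≠ '+' ∧ c ≠ '-') :
    PySem.Chars.zfill cs (w : Int) = List.replicate (w - cs.length) '0' ++ cs := by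
  unfold PySem.Chars.zfill
  by_cases hw : (w : Int) ≤ (cs.length : Int)
  · rw [if_pos hw]
    have hz : w - cs.length = 0 := by omega
    simp [hz]
  · rw [if_neg hw]
    cases cs with
    | nil => simp
    | cons c rest =>
      have hnc := hs c (by simp)
      have hor : ¬(c = '+' ∨ c = '-') := by rintro (h | h) <;> simp [h] at hnc
      simp [hor]

-- shared conclusion: rendering pvVal r with B's loop and zfilling to width r.length reproduces r
lemma pvFinish (bn : Nat) (h2 : 2 ≤ bn) (h16 : bn ≤ 16) (r : List Char) (n : Nat)
    (hrv : ∀ c ∈ r, c ∈ pvHex.take bn) (hrlen : r.length = n) :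
    String.ofList r.reverse
      = String.ofList (PySem.Chars.zfill (pvRenderB (pvHex.take bn) bn (pvVal (pvHex.take bn) bn r) []) (n : Int)) := by
  have hlen := pvDl_len bn h16
  have h00 := pvDl_idxOf_zero bn h2
  have h0m := pvDl_zero_mem bn h2
  have hu := pvRep_unique (pvHex.take bn) bn h2 hlen (pvDl_nodup bn) h00 r hrv
  have hrend : pvRenderB (pvHex.take bn) bn (pvVal (pvHex.take bn) bn r) []
      = (pvLsb (pvHex.take bn) bn (pvVal (pvHex.take bn) bn r)).reverse := by
    simp [pvLsb]
  have hsign : ∀ c ∈ pvRenderB (pvHex.take bn) bn (pvVal (pvHex.take bn) bn r) [], c ≠ '+' ∧ c ≠ '-' := by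
    intro c hc
    exact pvDl_nosign bn c (pvRenderB_mem (pvHex.take bn) bn h0m _ [] (by simp) c hc)
  rw [pvZfill_shape _ n hsign, hrend]
  congr 1
  conv_lhs => rw [hu]
  rw [List.reverse_append, List.reverse_replicate, hrlen, List.length_reverse]

-- ===== VERDICT (by name: the statement is the Claim_ definition above) =====
theorem base_n_subtract_spec : Claim_equal_base_n_subtract := by
  intro num1 num2 base hdom hpre
  obtain ⟨hb2, hb16, hn1', hn2'⟩ := hpre
  have hn1 : ∀ c ∈ num1.toList, c ∈ pvHex.take base.toNat := by
    intro c hc; simpa using List.all_eq_true.mp hn1' c hc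
  have hn2 : ∀ c ∈ num2.toList, c ∈ pvHex.take base.toNat := by
    intro c hc; simpa using List.all_eq_true.mp hn2' c hc
  unfold Spec_base_n_subtract base_n_subtract base_n_subtract_alt
  rw [if_neg (by omega), if_neg (by omega)]
  simp only []
  have hbase : ((base.toNat : Int)) = base := Int.toNat_of_nonneg (by omega)
  set bn := base.toNat with hbn
  have h2 : 2 ≤ bn := by omega
  have h16 : bn ≤ 16 := by omega
  have hdl : PySem.List.slice pvHex none (some base) = pvHex.take bn := by
    rw [← hbase, PySem.List.slice_to pvHex (by positivity)]
    simp
  rw [hdl]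
  set dl := pvHex.take bn with hdldef
  have hlen := pvDl_len bn h16
  have hnd := pvDl_nodup bn
  have h00 := pvDl_idxOf_zero bn h2
  have h0m := pvDl_zero_mem bn h2
  set n := max num1.toList.length num2.toList.length with hn
  -- the padded strings
  have hsh1 : PySem.Chars.zfill num1.toList (n : Int)
      = List.replicate (n - num1.toList.length) '0' ++ num1.toList :=
    pvZfill_shape _ n (fun c hc => pvDl_nosign bn c (hn1 c hc))
  have hsh2 : PySem.Chars.zfill num2.toList (n : Int)
      = List.replicate (n - num2.toList.length) '0' ++ num2.toList :=
    pvZfill_shape _ n (fun c hc => pvDl_nosign bn c (hn2 c hc))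
  rw [hsh1, hsh2]
  set p1 := List.replicate (n - num1.toList.length) '0' ++ num1.toList with hp1
  set p2 := List.replicate (n - num2.toList.length) '0' ++ num2.toList with hp2
  have hp1len : p1.reverse.length = n := by
    rw [hp1]; simp [hn]
  have hp2len : p2.reverse.length = n := by
    rw [hp2]; simp [hn]
  have hv1 : ∀ c ∈ p1.reverse, c ∈ dl := by
    intro c hc
    rw [List.mem_reverse] at hc
    rcases List.mem_append.mp hc with hc | hc
    · rw [List.eq_of_mem_replicate hc]; exact h0m
    · exact hn1 c hc
  have hv2 : ∀ c ∈ p2.reverse, c ∈ dl := by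
    intro c hc
    rw [List.mem_reverse] at hc
    rcases List.mem_append.mp hc with hc | hc
    · rw [List.eq_of_mem_replicate hc]; exact h0m
    · exact hn2 c hc
  -- the values
  have hval1 : pvVal dl bn p1.reverse = pvVal dl bn num1.toList.reverse := by
    rw [hp1, List.reverse_append, List.reverse_replicate, pvVal_append_zeros dl bn h00]
  have hval2 : pvVal dl bn p2.reverse = pvVal dl bn num2.toList.reverse := by
    rw [hp2, List.reverse_append, List.reverse_replicate, pvVal_append_zeros dl bn h00]
  have hparse1 : num1.toList.foldl (fun v c => v * bn + dl.idxOf c) 0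
      = pvVal dl bn num1.toList.reverse := by
    rw [pvFoldl_parse]; simp
  have hparse2 : num2.toList.foldl (fun v c => v * bn + dl.idxOf c) 0
      = pvVal dl bn num2.toList.reverse := by
    rw [pvFoldl_parse]; simp
  rw [hparse1, hparse2]
  set v1 := pvVal dl bn num1.toList.reverse with hv1def
  set v2 := pvVal dl bn num2.toList.reverse with hv2def
  rw [show base = (bn : Int) from hbase.symm]
  by_cases hvv : v1 < v2
  · -- A borrows on the first pass and recurses with the operands swapped
    obtain ⟨r, hpass, hrv, hrlen, heq⟩ :=
      pvPassA_spec dl bn h2 hlen hnd p1.reverse p2.reverse (by rw [hp1len, hp2len]) hv1 hv2 0 (by omega)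
    obtain ⟨r2, hpass2, hrv2, hrlen2, heq2⟩ :=
      pvPassA_spec dl bn h2 hlen hnd p2.reverse p1.reverse (by rw [hp1len, hp2len]) hv2 hv1 0 (by omega)
    rw [hval1, hval2] at hpass heq hpass2 heq2
    rw [if_pos (by omega)] at hpass heq
    rw [if_neg (by omega)] at hpass2 heq2
    rw [Nat.cast_zero] at hpass hpass2
    have hd : max v1 v2 - min v1 v2 = pvVal dl bn r2 := by omega
    rw [hpass, hpass2, hd]
    norm_num
    exact pvFinish bn h2 h16 r2 n hrv2 (by rw [hrlen2, hp2len])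
  · -- no final borrow: A returns the first pass's digits
    obtain ⟨r, hpass, hrv, hrlen, heq⟩ :=
      pvPassA_spec dl bn h2 hlen hnd p1.reverse p2.reverse (by rw [hp1len, hp2len]) hv1 hv2 0 (by omega)
    rw [hval1, hval2] at hpass heq
    rw [if_neg (by omega)] at hpass heq
    rw [Nat.cast_zero] at hpass
    have hd : max v1 v2 - min v1 v2 = pvVal dl bn r := by omega
    rw [hpass, hd]
    norm_num
    exact pvFinish bn h2 h16 r n hrv (by rw [hrlen, hp1len])
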